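-- pv_equiv track=rewrite | github.com/AytugUlubay/codeWarsPython | kyu7/Array - squareUp b!.py | square_up
-- ===== SOURCE A (Python) =====
-- def square_up(n):
--     l=[]
--     for i in range(n,0,-1):
--         for j in range(1,i+1):
--             l.append(j)
--         for k in range(n-j):
--             l.append(0)
--     return l[::-1]
-- ===== SOURCE B (Python) =====
-- def square_up(n):
--     return [x for i in range(1, n + 1)
--               for x in [0] * (n - i) + list(range(i, 0, -1))]
-- ===== Notes on version B (the rewrite author's own statement) =====
-- stated objective: simpler
-- what changed: B builds each row directly in its final orientation ((n-i) zeros then i..1 descending) as one flat comprehension over i=1..n, eliminating A's accumulator, the separate zero-padding loop driven by the leaked loop variable j, and the global final reversal l[::-1].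
import Mathlib
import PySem

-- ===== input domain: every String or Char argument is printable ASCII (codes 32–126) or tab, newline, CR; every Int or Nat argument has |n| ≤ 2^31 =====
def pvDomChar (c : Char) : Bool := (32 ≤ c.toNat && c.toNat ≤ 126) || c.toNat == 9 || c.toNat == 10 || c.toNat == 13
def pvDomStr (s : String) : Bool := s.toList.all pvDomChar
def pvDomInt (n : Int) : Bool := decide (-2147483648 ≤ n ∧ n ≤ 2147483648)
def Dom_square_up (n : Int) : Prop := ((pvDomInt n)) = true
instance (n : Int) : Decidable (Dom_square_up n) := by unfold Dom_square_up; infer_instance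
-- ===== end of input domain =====

-- B builds each row in its final orientation as one flat comprehension, removing A's accumulator, the j-driven zero loop and the final l[::-1]; proved equal for every n.


-- ===== PORT A =====
-- state is (l, j): Python's inner-loop variable j leaks and is read by 'range(n - j)';
-- it is never read before first assignment (each outer i ≥ 1 runs the inner loop), so the
-- initial j component 0 is never used.
def square_up (n : Int) : List Int :=
  let st := (PySem.List.pyRange n 0 (-1)).foldl (fun (st : List Int × Int) i =>
    let st := (PySem.List.pyRange 1 (i + 1) 1).foldl
      (fun (st : List Int × Int) j => (st.1 ++ [j], j)) st
    let l := (PySem.List.pyRange 0 (n - st.2) 1).foldl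
      (fun (l : List Int) _k => l ++ [(0 : Int)]) st.1
    (l, st.2)) ([], 0)
  (PySem.List.slice? st.1 none none (-1)).getD []   -- l[::-1]; slice? with step -1 is always some

-- ===== PORT B =====
def square_up_alt (n : Int) : List Int :=
  (PySem.List.pyRange 1 (n + 1) 1).flatMap (fun i =>
    List.replicate (n - i).toNat 0 ++ PySem.List.pyRange i 0 (-1))

-- ===== PRECONDITION & SPEC =====
def Spec_square_up (n : Int) (out : List Int) : Prop := out = square_up_alt n
instance (n : Int) (out : List Int) : Decidable (Spec_square_up n out) := by unfold Spec_square_up; infer_instance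

-- ===== CLAIM (what is proved, stated in full; the proofs are below) =====
def Claim_equal_square_up : Prop := ∀ (n : Int), Dom_square_up n → Spec_square_up n (square_up n)

-- ===== LEMMAS AND PROOFS =====

-- the inner append loop: appends the whole list, second component ends as its last element
theorem foldl_append_pair (xs : List Int) (l : List Int) (j0 : Int) :
    xs.foldl (fun (st : List Int × Int) j => (st.1 ++ [j], j)) (l, j0)
      = (l ++ xs, xs.getLastD j0) := by
  induction xs generalizing l j0 with
  | nil => simp
  | cons x xs ih =>
    simp only [List.foldl_cons, ih]
    cases xs <;> simp [List.getLast?_cons]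

-- the zero-padding loop appends replicate
theorem foldl_append_zero (xs : List Int) (l : List Int) :
    xs.foldl (fun (l : List Int) _k => l ++ [(0 : Int)]) l
      = l ++ List.replicate xs.length 0 := by
  induction xs generalizing l with
  | nil => simp
  | cons x xs ih =>
    simp only [List.foldl_cons, ih, List.length_cons]
    simp [List.replicate_succ, List.append_assoc]

def rowA (n i : Int) : List Int :=
  PySem.List.pyRange 1 (i + 1) 1 ++ List.replicate (n - i).toNat 0

theorem outer_loop (n : Int) : ∀ (a : Int), a ≤ n → ∀ (l : List Int) (j0 : Int),
    ((PySem.List.pyRange a 0 (-1)).foldl (fun (st : List Int × Int) i =>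
      let st := (PySem.List.pyRange 1 (i + 1) 1).foldl
        (fun (st : List Int × Int) j => (st.1 ++ [j], j)) st
      let l := (PySem.List.pyRange 0 (n - st.2) 1).foldl
        (fun (l : List Int) _k => l ++ [(0 : Int)]) st.1
      (l, st.2)) (l, j0)).1
      = l ++ (PySem.List.pyRange a 0 (-1)).flatMap (rowA n) := by
  intro a
  induction a using Int.induction_on with
  | zero =>
    intro _ l j0
    rw [PySem.List.pyRange_neg_one_eq_nil le_rfl]; simp
  | succ i ih =>
    intro ha l j0
    rw [PySem.List.pyRange_neg_one_cons (by omega : (0:Int) < i + 1)]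
    simp only [List.foldl_cons, List.flatMap_cons]
    rw [foldl_append_pair]
    have hlast : (PySem.List.pyRange 1 ((i:Int) + 1 + 1) 1).getLastD j0 = (i:Int) + 1 := by
      rw [PySem.List.pyRange_one_succ_right (by omega : (1:Int) ≤ (i:Int) + 1)]
      simp
    rw [hlast, foldl_append_zero, PySem.List.length_pyRange_one]
    have h1 : (i:Int) + 1 - 1 = (i:Int) := by ring
    rw [h1, ih (by omega)]
    simp [rowA]
  | pred i ih =>
    intro _ l j0
    rw [PySem.List.pyRange_neg_one_eq_nil (by omega)]; simp

theorem reverse_pyRange_countdown (a : Int) :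
    (PySem.List.pyRange a 0 (-1)).reverse = PySem.List.pyRange 1 (a + 1) 1 := by
  rw [PySem.List.pyRange_neg_one_eq_reverse]
  simp

theorem square_up_spec : Claim_equal_square_up := by
  intro n _
  unfold Spec_square_up square_up square_up_alt
  simp only
  rw [outer_loop n n le_rfl, PySem.List.slice?_none_none_neg_one]
  simp only [Option.getD_some, List.nil_append]
  rw [List.reverse_flatMap, reverse_pyRange_countdown]
  have hrow : ∀ i : Int, (rowA n i).reverse
      = List.replicate (n - i).toNat 0 ++ PySem.List.pyRange i 0 (-1) := by
    intro i
    rw [rowA, List.reverse_append, List.reverse_replicate,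
        PySem.List.pyRange_neg_one_eq_reverse]
    norm_num
  simp only [Function.comp_def, hrow]
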